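-- pv_equiv track=rewrite | github.com/dohlee/snakemake-wrappers | macs2/bdgcmp/wrapper.py | determine_methods
-- ===== SOURCE A (Python) =====
-- def determine_methods(outputs):
--     lookup = {
--         '_ppois.bdg': 'ppois',
--         '_qpois.bdg': 'qpois',
--         '_subtract.bdg': 'subtract',
--         '_FE.bdg': 'FE',
--         '_logFE.bdg': 'logFE',
--         '_logLR.bdg': 'logLR',
--         '_slogLR.bdg': 'slogLR',
--     }
--
--     methods = []
--     for output in outputs:
--         found_suffix = False
--
--         for suffix, method in lookup.items():
--             if output.endswith(suffix):
--                 methods.append(method)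
--                 found_suffix = True
--
--         if not found_suffix:
--             raise ValueError('Invalid output file name: ' + output)
--
--     return '--method ' + ' '.join(methods)
-- ===== SOURCE B (Python) =====
-- VALID_METHODS = {'ppois', 'qpois', 'subtract', 'FE', 'logFE', 'logLR', 'slogLR'}
--
--
-- def determine_methods(outputs):
--     methods = []
--     for output in outputs:
--         if not output.endswith('.bdg'):
--             raise ValueError('Invalid output file name: ' + output)
--         rev = output[:-4][::-1]
--         k = rev.find('_')
--         if k == -1:
--             raise ValueError('Invalid output file name: ' + output)
--         token = rev[:k][::-1]
--         if token not in VALID_METHODS: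
--             raise ValueError('Invalid output file name: ' + output)
--         methods.append(token)
--     return '--method ' + ' '.join(methods)
-- ===== Notes on version B (the rewrite author's own statement) =====
-- stated objective: idiomatic
-- what changed: Instead of scanning all seven suffix->method dict entries per output, B parses each name directly: require the '.bdg' extension, take the token after the last '_', and test it against the set of valid methods.
import Mathlib
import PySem

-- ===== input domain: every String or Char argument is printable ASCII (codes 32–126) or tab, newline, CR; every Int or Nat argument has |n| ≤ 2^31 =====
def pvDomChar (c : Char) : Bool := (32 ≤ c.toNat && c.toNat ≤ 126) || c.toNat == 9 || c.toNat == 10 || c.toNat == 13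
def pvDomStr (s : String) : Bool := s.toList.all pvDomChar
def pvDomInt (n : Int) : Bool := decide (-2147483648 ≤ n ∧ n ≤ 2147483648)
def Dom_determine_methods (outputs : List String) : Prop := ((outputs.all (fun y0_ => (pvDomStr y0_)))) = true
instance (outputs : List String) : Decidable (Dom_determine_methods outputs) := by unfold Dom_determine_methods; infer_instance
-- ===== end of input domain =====

-- B replaces A's inner scan over the seven suffix→method pairs by direct parsing of each
-- output name (strip '.bdg', take the token after the last '_', test it against the method
-- set); return-value equivalence only — both Pythons raise ValueError on invalid names,
-- which Pre_ excludes.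

-- ===== PORT A =====
-- items of A's literal dict (7 distinct keys, so .items() is exactly this list in order)
def pvLookup : List (String × String) :=
  [("_ppois.bdg", "ppois"), ("_qpois.bdg", "qpois"), ("_subtract.bdg", "subtract"),
   ("_FE.bdg", "FE"), ("_logFE.bdg", "logFE"), ("_logLR.bdg", "logLR"),
   ("_slogLR.bdg", "slogLR")]

-- A's inner loop: for suffix, method in lookup.items(): …  (state = (methods, found_suffix))
def pvScanA (output : String) (ms : List String) : List String × Bool :=
  pvLookup.foldl
    (fun p kv => if PySem.Str.endswith output kv.1 then (p.1 ++ [kv.2], true) else p)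
    (ms, false)

-- A's outer loop body; `none` marks the raised ValueError (excluded by Pre_)
def pvStepA (st : Option (List String)) (output : String) : Option (List String) :=
  match st with
  | none => none
  | some ms =>
    let r := pvScanA output ms
    if r.2 then some r.1 else none

def determine_methods (outputs : List String) : String :=
  match outputs.foldl pvStepA (some []) with
  | some ms => "--method " ++ PySem.Str.join " " ms
  | none => ""   -- unreachable under Pre_ (Python raises ValueError)

-- ===== PORT B =====
-- the Python set literal VALID_METHODS (distinct elements, as PySem.Set)
def pvValid : List String :=
  ["ppois", "qpois", "subtract", "FE", "logFE", "logLR", "slogLR"]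

-- B's per-output parse; `none` marks the raised ValueError
def pvParse (output : String) : Option String :=
  if PySem.Str.endswith output ".bdg" then
    -- rev = output[:-4][::-1]  (slice, then reverse for [::-1]; exact)
    let rev := (PySem.List.slice output.toList none (some (-4))).reverse
    let k := PySem.Chars.find rev ['_']      -- rev.find('_')
    if k = -1 then none
    else
      -- token = rev[:k][::-1]  (k ≥ 0 here, so rev[:k] = take k)
      let token := String.ofList ((rev.take k.toNat).reverse)
      if pvValid.contains token then some token else none
  else none

def pvStepB (st : Option (List String)) (output : String) : Option (List String) :=
  match st with
  | none => none
  | some ms =>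
    match pvParse output with
    | some t => some (ms ++ [t])
    | none => none

def determine_methods_alt (outputs : List String) : String :=
  match outputs.foldl pvStepB (some []) with
  | some ms => "--method " ++ PySem.Str.join " " ms
  | none => ""   -- unreachable under Pre_ (Python raises ValueError)

-- ===== PRECONDITION & SPEC =====
-- Pre_ = exactly the inputs where Python A returns: every output name ends with one of the
-- seven recognised '_<method>.bdg' suffixes (otherwise both Pythons raise ValueError).
def Pre_determine_methods (outputs : List String) : Prop :=
  (outputs.all (fun s =>
    (["_ppois.bdg", "_qpois.bdg", "_subtract.bdg", "_FE.bdg",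
      "_logFE.bdg", "_logLR.bdg", "_slogLR.bdg"].any
        (fun suf => PySem.Str.endswith s suf)))) = true
instance (outputs : List String) : Decidable (Pre_determine_methods outputs) := by
  unfold Pre_determine_methods; infer_instance

def pvWitness_determine_methods : List String := (["sample_treat_ppois.bdg", "x_FE.bdg"])

def Spec_determine_methods (outputs : List String) (out : String) : Prop :=
  out = determine_methods_alt outputs
instance (outputs : List String) (out : String) : Decidable (Spec_determine_methods outputs out) := by
  unfold Spec_determine_methods; infer_instance

-- ===== CLAIM (what is proved, stated in full; the proofs are below) =====
def Claim_equal_determine_methods : Prop :=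
  ∀ (outputs : List String), Dom_determine_methods outputs →
    Pre_determine_methods outputs →
    Spec_determine_methods outputs (determine_methods outputs)

-- ===== LEMMAS AND PROOFS =====

-- output[:-4] is take (len - 4)
theorem pv_slice_neg4 (l : List Char) :
    PySem.List.slice l none (some (-4)) = l.take (l.length - 4) := by
  unfold PySem.List.slice PySem.List.clampIdx
  simp only []
  split_ifs with h1 h2 <;> [skip; skip; omega] <;>
  · congr 1
    omega

-- find points at the first '_', so on a ++ '_' :: b with '_'-free a it returns a.length
theorem pv_find_underscore (a b : List Char) (ha : '_' ∉ a) :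
    PySem.Chars.find (a ++ '_' :: b) ['_'] = (a.length : Int) := by
  have hnn : 0 ≤ PySem.Chars.find (a ++ '_' :: b) ['_'] := by
    rw [PySem.Chars.find_nonneg_iff]
    exact ⟨a, b, by simp⟩
  obtain ⟨hpre, hmin⟩ := PySem.Chars.find_spec hnn
  set n := (PySem.Chars.find (a ++ '_' :: b) ['_']).toNat with hn
  have h1 : n ≤ a.length := by
    by_contra h
    exact hmin a.length (by omega) (by simp)
  have h2 : ¬ n < a.length := by
    intro h
    obtain ⟨r, hr⟩ := hpre
    have hget : (a ++ '_' :: b)[n]? = some '_' := by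
      have h0 : (List.drop n (a ++ '_' :: b))[0]? = some '_' := by
        rw [← hr]; rfl
      simpa [List.getElem?_drop] using h0
    rw [List.getElem?_append_left (by omega)] at hget
    have hgn : a[n]? = some a[n] := List.getElem?_eq_getElem h
    rw [hgn] at hget
    have : a[n] = '_' := by simpa using hget
    exact ha (this ▸ a.getElem_mem h)
  have hne : n = a.length := by omega
  omega

theorem pv_toList_pat (t : String) :
    ("_" ++ t ++ ".bdg").toList = '_' :: (t.toList ++ ['.', 'b', 'd', 'g']) := by
  simp

-- forward: if s ends with '_<t>.bdg' for a valid '_'-free t, B's parse returns t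
theorem pv_parse_of_suffix (u : List Char) (t : String) (s : String)
    (hfree : '_' ∉ t.toList) (hv : pvValid.contains t = true)
    (hs : s.toList = u ++ ('_' :: (t.toList ++ ['.', 'b', 'd', 'g']))) :
    pvParse s = some t := by
  have hends : PySem.Str.endswith s ".bdg" = true := by
    rw [PySem.Str.endswith_eq, PySem.Chars.endswith_iff]
    exact ⟨u ++ '_' :: t.toList, by simp [hs]⟩
  have hstem : PySem.List.slice s.toList none (some (-4)) = u ++ '_' :: t.toList := by
    rw [pv_slice_neg4, hs]
    have hre : u ++ '_' :: (t.toList ++ ['.', 'b', 'd', 'g'])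
        = (u ++ '_' :: t.toList) ++ ['.', 'b', 'd', 'g'] := by simp
    rw [hre]
    apply List.take_left'
    simp
    omega
  have hrev : (u ++ '_' :: t.toList).reverse = t.toList.reverse ++ '_' :: u.reverse := by
    simp
  have hk : PySem.Chars.find ((u ++ '_' :: t.toList).reverse) ['_'] = (t.toList.length : Int) := by
    rw [hrev, pv_find_underscore _ _ (by simpa using hfree)]
    simp
  have hne : ¬ PySem.Chars.find ((u ++ '_' :: t.toList).reverse) ['_'] = -1 := by
    rw [hk]; omega
  have htok : ((u ++ '_' :: t.toList).reverse.take
      (PySem.Chars.find ((u ++ '_' :: t.toList).reverse) ['_']).toNat).reverse = t.toList := by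
    rw [hk, hrev]
    have : List.take ((t.toList.length : Int)).toNat (t.toList.reverse ++ '_' :: u.reverse)
        = t.toList.reverse := by
      apply List.take_left'
      simp
    rw [this, List.reverse_reverse]
  simp only [pvParse, hends, if_true, hstem, hne, if_false, htok]
  simp only [String.ofList_toList, hv, if_true]

-- backward: if B's parse returns t, then t is valid and s ends with '_<t>.bdg'
theorem pv_suffix_of_parse (s t : String) (h : pvParse s = some t) :
    pvValid.contains t = true ∧
      ∃ u, s.toList = u ++ ('_' :: (t.toList ++ ['.', 'b', 'd', 'g'])) := by
  by_cases h1 : PySem.Str.endswith s ".bdg" = true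
  swap
  · simp only [pvParse, h1, if_false, Bool.false_eq_true] at h
    exact absurd h (by simp)
  · obtain ⟨p, hp⟩ : ∃ p, s.toList = p ++ ['.', 'b', 'd', 'g'] := by
      have h1' := h1
      rw [PySem.Str.endswith_eq, PySem.Chars.endswith_iff] at h1'
      obtain ⟨p, hp⟩ := h1'
      exact ⟨p, hp.symm⟩
    have hstem : PySem.List.slice s.toList none (some (-4)) = p := by
      rw [pv_slice_neg4, hp]
      apply List.take_left'
      simp
    by_cases h2 : PySem.Chars.find p.reverse ['_'] = -1
    · simp only [pvParse, h1, if_true, hstem, h2] at h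
      exact absurd h (by simp)
    have hnn : 0 ≤ PySem.Chars.find p.reverse ['_'] := by
      have := PySem.Chars.neg_one_le_find p.reverse ['_']
      omega
    obtain ⟨hpre, -⟩ := PySem.Chars.find_spec hnn
    set n := (PySem.Chars.find p.reverse ['_']).toNat with hn
    obtain ⟨r, hr⟩ := hpre
    have hdec : p.reverse = p.reverse.take n ++ '_' :: r := by
      conv_lhs => rw [← List.take_append_drop n p.reverse, ← hr]
      rfl
    simp only [pvParse, h1, if_true, hstem, h2, if_false, ← hn] at h
    by_cases h3 : pvValid.contains (String.ofList (p.reverse.take n).reverse) = true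
    swap
    · simp only [h3, Bool.false_eq_true, if_false] at h
      exact absurd h (by simp)
    rw [if_pos h3] at h
    have ht : t = String.ofList (p.reverse.take n).reverse := by
      exact (Option.some.injEq _ _ ▸ h).symm
    have htl : t.toList = (p.reverse.take n).reverse := by
      rw [ht, String.toList_ofList]
    refine ⟨by rw [ht]; exact h3, r.reverse, ?_⟩
    have hprev : p = r.reverse ++ '_' :: t.toList := by
      have hc := congrArg List.reverse hdec
      rw [List.reverse_reverse] at hc
      rw [hc]
      simp [htl]
    rw [hp, hprev]
    simp

-- with B's parse known, each of A's seven suffix tests is decided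
theorem pv_ends_eq (s t m : String) (hp : pvParse s = some t)
    (hfree : '_' ∉ m.toList) (hv : pvValid.contains m = true) :
    PySem.Str.endswith s ("_" ++ m ++ ".bdg") = (m == t) := by
  by_cases he : m = t
  · subst he
    obtain ⟨_, u, hu⟩ := pv_suffix_of_parse s m hp
    simp only [beq_self_eq_true]
    rw [PySem.Str.endswith_eq, PySem.Chars.endswith_iff, pv_toList_pat]
    exact ⟨u, hu.symm⟩
  · have : (m == t) = false := by simp [he]
    rw [this]
    by_contra hc
    have hc' : PySem.Str.endswith s ("_" ++ m ++ ".bdg") = true := by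
      cases hx : PySem.Str.endswith s ("_" ++ m ++ ".bdg") <;> simp_all
    rw [PySem.Str.endswith_eq, PySem.Chars.endswith_iff, pv_toList_pat] at hc'
    obtain ⟨u, hu⟩ := hc'
    have := pv_parse_of_suffix u m s hfree hv hu.symm
    rw [hp] at this
    exact he (by simpa using this.symm)

-- if B's parse fails, every one of A's suffix tests fails
theorem pv_ends_false (s m : String) (hp : pvParse s = none)
    (hfree : '_' ∉ m.toList) (hv : pvValid.contains m = true) :
    PySem.Str.endswith s ("_" ++ m ++ ".bdg") = false := by
  by_contra hc
  have hc' : PySem.Str.endswith s ("_" ++ m ++ ".bdg") = true := by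
    cases hx : PySem.Str.endswith s ("_" ++ m ++ ".bdg") <;> simp_all
  rw [PySem.Str.endswith_eq, PySem.Chars.endswith_iff, pv_toList_pat] at hc'
  obtain ⟨u, hu⟩ := hc'
  have := pv_parse_of_suffix u m s hfree hv hu.symm
  rw [hp] at this
  exact absurd this (by simp)

-- the two per-output loop bodies agree
theorem pv_step_eq : pvStepA = pvStepB := by
  funext st s
  cases st with
  | none => rfl
  | some ms =>
    cases hp : pvParse s with
    | none =>
      have e1 := pv_ends_false s "ppois" hp (by decide) (by decide)
      have e2 := pv_ends_false s "qpois" hp (by decide) (by decide)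
      have e3 := pv_ends_false s "subtract" hp (by decide) (by decide)
      have e4 := pv_ends_false s "FE" hp (by decide) (by decide)
      have e5 := pv_ends_false s "logFE" hp (by decide) (by decide)
      have e6 := pv_ends_false s "logLR" hp (by decide) (by decide)
      have e7 := pv_ends_false s "slogLR" hp (by decide) (by decide)
      simp_all [pvStepA, pvStepB, pvScanA, pvLookup, List.foldl_cons, List.foldl_nil]
    | some t =>
      have e1 := pv_ends_eq s t "ppois" hp (by decide) (by decide)
      have e2 := pv_ends_eq s t "qpois" hp (by decide) (by decide)
      have e3 := pv_ends_eq s t "subtract" hp (by decide) (by decide)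
      have e4 := pv_ends_eq s t "FE" hp (by decide) (by decide)
      have e5 := pv_ends_eq s t "logFE" hp (by decide) (by decide)
      have e6 := pv_ends_eq s t "logLR" hp (by decide) (by decide)
      have e7 := pv_ends_eq s t "slogLR" hp (by decide) (by decide)
      have hv := (pv_suffix_of_parse s t hp).1
      have hvv : t = "ppois" ∨ t = "qpois" ∨ t = "subtract" ∨ t = "FE" ∨
          t = "logFE" ∨ t = "logLR" ∨ t = "slogLR" := by
        simpa [pvValid] using hv
      rcases hvv with rfl | rfl | rfl | rfl | rfl | rfl | rfl <;>
        simp_all [pvStepA, pvStepB, pvScanA, pvLookup, List.foldl_cons, List.foldl_nil]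

-- ===== VERDICT (by name: the statement is the Claim_ definition above) =====
theorem determine_methods_spec : Claim_equal_determine_methods := by
  intro outputs _ _
  unfold Spec_determine_methods determine_methods determine_methods_alt
  rw [pv_step_eq]
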